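-- pv_equiv track=rewrite | github.com/ayushmauryaiitj/chatbot.ai | backend.py | fallback_recommendation
-- ===== SOURCE A (Python) =====
-- from typing import List, Dict
--
-- def fallback_recommendation(user_input: str, schemes: List[Dict]) -> str:
--     """
--     Simple deterministic fallback if the OpenAI API is not available.
--     Uses keyword matching over categories and names.
--     """
--     if not schemes:
--         return (
--             "Service temporarily unavailable. "
--             "Scheme database is not accessible right now. "
--             "Please try again later."
--         )
--
--     text = user_input.lower()
--     matches = []
--
--     for s in schemes:
--         name = s.get("name", "").lower()
--         category = s.get("category", "").lower()
--         eligibility = s.get("eligibility", "").lower()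
--
--         score = 0
--         # Very naive keyword scoring
--         keywords = [
--             "farmer",
--             "kisan",
--             "agriculture",
--             "health",
--             "hospital",
--             "insurance",
--             "house",
--             "housing",
--             "ghar",
--             "awas",
--             "poor",
--             "low income",
--             "hospitalization",
--         ]
--
--         for kw in keywords:
--             if kw in text and kw in (name + " " + category + " " + eligibility):
--                 score += 1
--
--         if score > 0:
--             matches.append((score, s))
--
--     matches.sort(key=lambda x: x[0], reverse=True)
--     top = [m[1] for m in matches[:3]]
--
--     if not top:
--         # Generic response if nothing matched
--         return (
--             "Service temporarily unavailable, showing basic suggestions.\n\n"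
--             "Based on your query, you may be eligible for central or state government schemes. "
--             "Please visit your nearest CSC center or official government portal (such as pmindia.gov.in or "
--             "the relevant ministry website) for detailed, up-to-date information."
--         )
--
--     lines = ["Service temporarily unavailable, showing basic suggestions.\n"]
--     lines.append("Here are some schemes that may be relevant:")
--
--     for s in top:
--         lines.append(
--             f"- **{s.get('name', 'Unknown')}**: {s.get('benefit', '')} "
--             f"(Eligibility: {s.get('eligibility', 'Not specified')})"
--         )
--
--     return "\n".join(lines)
-- ===== SOURCE B (Python) =====
-- from typing import List, Dict
--
-- KEYWORDS = [
--     "farmer", "kisan", "agriculture", "health", "hospital", "insurance",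
--     "house", "housing", "ghar", "awas", "poor", "low income", "hospitalization",
-- ]
--
-- def fallback_recommendation(user_input: str, schemes: List[Dict]) -> str:
--     if not schemes:
--         return (
--             "Service temporarily unavailable. "
--             "Scheme database is not accessible right now. "
--             "Please try again later."
--         )
--
--     text = user_input.lower()
--     # Hoist the text test out of the per-scheme loop: only keywords present in
--     # the query can ever score.
--     active = [kw for kw in KEYWORDS if kw in text]
--
--     # Scores are bounded by len(KEYWORDS) == 13, so bucket instead of sorting;
--     # reading buckets high-to-low preserves the stable descending order.
--     buckets = [[] for _ in range(14)]
--     for s in schemes: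
--         blob = (
--             s.get("name", "").lower()
--             + " "
--             + s.get("category", "").lower()
--             + " "
--             + s.get("eligibility", "").lower()
--         )
--         score = 0
--         for kw in active:
--             if kw in blob:
--                 score += 1
--         if score > 0:
--             buckets[score].append(s)
--
--     top = []
--     for sc in range(13, 0, -1):
--         top.extend(buckets[sc])
--     top = top[:3]
--
--     if not top:
--         return (
--             "Service temporarily unavailable, showing basic suggestions.\n\n"
--             "Based on your query, you may be eligible for central or state government schemes. "
--             "Please visit your nearest CSC center or official government portal (such as pmindia.gov.in or "
--             "the relevant ministry website) for detailed, up-to-date information."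
--         )
--
--     lines = ["Service temporarily unavailable, showing basic suggestions.\n"]
--     lines.append("Here are some schemes that may be relevant:")
--     for s in top:
--         lines.append(
--             f"- **{s.get('name', 'Unknown')}**: {s.get('benefit', '')} "
--             f"(Eligibility: {s.get('eligibility', 'Not specified')})"
--         )
--     return "\n".join(lines)
-- ===== Notes on version B (the rewrite author's own statement) =====
-- stated objective: faster
-- what changed: B hoists the 'keyword in text' test out of the per-scheme loop (scoring only keywords actually present in the query) and replaces building a flat match list plus a stable descending sort by appending each qualifying scheme to a bucket indexed by its bounded score (0..13) and reading the buckets from 13 down to 1, which preserves the stable tie order.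
import Mathlib
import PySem

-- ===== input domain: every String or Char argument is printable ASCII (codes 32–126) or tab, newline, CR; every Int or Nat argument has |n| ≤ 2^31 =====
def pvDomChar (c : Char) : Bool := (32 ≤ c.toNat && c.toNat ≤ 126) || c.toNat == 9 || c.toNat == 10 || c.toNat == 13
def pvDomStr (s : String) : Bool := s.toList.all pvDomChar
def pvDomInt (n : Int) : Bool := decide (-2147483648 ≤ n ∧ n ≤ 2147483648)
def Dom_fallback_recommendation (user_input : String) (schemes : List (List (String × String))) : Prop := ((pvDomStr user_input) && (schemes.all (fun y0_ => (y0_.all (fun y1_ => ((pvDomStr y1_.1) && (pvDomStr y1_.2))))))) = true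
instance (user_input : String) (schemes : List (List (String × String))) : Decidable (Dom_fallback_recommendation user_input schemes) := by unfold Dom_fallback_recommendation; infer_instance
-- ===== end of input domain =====

-- B replaces the flat match list + stable descending sort by score buckets (0..13) read
-- high-to-low, and scores each scheme only against the keywords present in the query.

-- shared constants and the formatting tail (identical code in both Pythons)
def pvMsgEmpty : String :=
  "Service temporarily unavailable. Scheme database is not accessible right now. Please try again later."

def pvMsgGeneric : String :=
  "Service temporarily unavailable, showing basic suggestions.\n\nBased on your query, you may be eligible for central or state government schemes. Please visit your nearest CSC center or official government portal (such as pmindia.gov.in or the relevant ministry website) for detailed, up-to-date information."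

def pvKeywords : List String :=
  ["farmer", "kisan", "agriculture", "health", "hospital", "insurance",
   "house", "housing", "ghar", "awas", "poor", "low income", "hospitalization"]

def pvBlob (s : List (String × String)) : String :=
  PySem.Str.lower ((PySem.Dict.mk s).getD "name" "") ++ " " ++
  PySem.Str.lower ((PySem.Dict.mk s).getD "category" "") ++ " " ++
  PySem.Str.lower ((PySem.Dict.mk s).getD "eligibility" "")

def pvLine (s : List (String × String)) : String :=
  "- **" ++ (PySem.Dict.mk s).getD "name" "Unknown" ++ "**: " ++
  (PySem.Dict.mk s).getD "benefit" "" ++ " (Eligibility: " ++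
  (PySem.Dict.mk s).getD "eligibility" "Not specified" ++ ")"

def pvFormat (top : List (List (String × String))) : String :=
  if top.isEmpty then pvMsgGeneric
  else PySem.Str.join "\n"
    (top.foldl (fun acc s => acc ++ [pvLine s])
      ["Service temporarily unavailable, showing basic suggestions.\n",
       "Here are some schemes that may be relevant:"])

-- ===== PORT A =====
def pvScoreA (text blob : String) : Int :=
  pvKeywords.foldl
    (fun sc kw => if PySem.Str.isIn kw text && PySem.Str.isIn kw blob then sc + 1 else sc) 0

def pvMatches (text : String) (schemes : List (List (String × String))) :
    List (Int × List (String × String)) :=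
  schemes.foldl
    (fun acc s =>
      let score := pvScoreA text (pvBlob s)
      if score > 0 then acc ++ [(score, s)] else acc) []

def fallback_recommendation (user_input : String) (schemes : List (List (String × String))) : String :=
  if schemes.isEmpty then pvMsgEmpty
  else
    pvFormat
      ((PySem.List.slice
          (PySem.List.sorted (pvMatches (PySem.Str.lower user_input) schemes) (fun m => m.1) true)
          none (some 3)).map (fun m => m.2))

-- ===== PORT B =====
def pvScoreB (active : List String) (blob : String) : Int :=
  active.foldl (fun sc kw => if PySem.Str.isIn kw blob then sc + 1 else sc) 0

def pvActive (text : String) : List String :=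
  pvKeywords.filter (fun kw => PySem.Str.isIn kw text)

def pvBuckets (active : List String) (schemes : List (List (String × String))) :
    List (List (List (String × String))) :=
  schemes.foldl
    (fun bk s =>
      let score := pvScoreB active (pvBlob s)
      if score > 0 then PySem.List.pySetD bk score (PySem.List.pyGetD bk score [] ++ [s]) else bk)
    (List.replicate 14 [])

def fallback_recommendation_alt (user_input : String) (schemes : List (List (String × String))) : String :=
  if schemes.isEmpty then pvMsgEmpty
  else
    pvFormat
      (PySem.List.slice
        ((PySem.List.pyRange 13 0 (-1)).foldl
          (fun acc k =>
            acc ++ PySem.List.pyGetD (pvBuckets (pvActive (PySem.Str.lower user_input)) schemes) k [])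
          [])
        none (some 3))

-- ===== PRECONDITION & SPEC =====
def Spec_fallback_recommendation (user_input : String) (schemes : List (List (String × String))) (out : String) : Prop := out = fallback_recommendation_alt user_input schemes
instance (user_input : String) (schemes : List (List (String × String))) (out : String) : Decidable (Spec_fallback_recommendation user_input schemes out) := by unfold Spec_fallback_recommendation; infer_instance

-- ===== CLAIM (what is proved, stated in full; the proofs are below) =====
def Claim_equal_fallback_recommendation : Prop := ∀ (user_input : String) (schemes : List (List (String × String))), Dom_fallback_recommendation user_input schemes → Spec_fallback_recommendation user_input schemes (fallback_recommendation user_input schemes)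

-- ===== LEMMAS AND PROOFS =====

-- a counting fold adds at most one per element
theorem pv_foldl_count_le (cond : String → Bool) :
    ∀ (l : List String) (i : Int),
      l.foldl (fun sc kw => if cond kw then sc + 1 else sc) i ≤ i + l.length := by
  intro l
  induction l with
  | nil => intro i; simp
  | cons a l ih =>
    intro i
    by_cases h : cond a <;> simp only [List.foldl_cons, h, if_true, List.length_cons] <;>
      [skip; skip] <;> calc _ ≤ _ := ih _
      _ ≤ _ := by omega

theorem pvScoreA_le (text blob : String) : pvScoreA text blob ≤ 13 := by
  have := pv_foldl_count_le
    (fun kw => PySem.Str.isIn kw text && PySem.Str.isIn kw blob) pvKeywords 0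
  simpa [pvScoreA, pvKeywords] using this

-- scoring only the keywords present in the text gives the same score
theorem pv_filter_foldl_score (p q : String → Bool) :
    ∀ (l : List String) (i : Int),
      (l.filter p).foldl (fun sc kw => if q kw then sc + 1 else sc) i =
        l.foldl (fun sc kw => if p kw && q kw then sc + 1 else sc) i := by
  intro l
  induction l with
  | nil => intro i; simp
  | cons a l ih =>
    intro i
    by_cases hp : p a <;> by_cases hq : q a <;>
      simp [hp, hq, ih]

theorem pvScore_eq (text blob : String) :
    pvScoreB (pvActive text) blob = pvScoreA text blob := by
  unfold pvScoreB pvActive pvScoreA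
  exact pv_filter_foldl_score (fun kw => PySem.Str.isIn kw text)
    (fun kw => PySem.Str.isIn kw blob) pvKeywords 0

-- A's match-building loop builds filter-then-map
theorem pvMatches_eq_aux (text : String) :
    ∀ (l : List (List (String × String))) (acc : List (Int × List (String × String))),
      l.foldl
        (fun acc s =>
          let score := pvScoreA text (pvBlob s)
          if score > 0 then acc ++ [(score, s)] else acc) acc =
      acc ++ (l.filter (fun s => decide (0 < pvScoreA text (pvBlob s)))).map
        (fun s => (pvScoreA text (pvBlob s), s)) := by
  intro l
  induction l with
  | nil => intro acc; simp
  | cons a l ih =>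
    intro acc
    by_cases h : 0 < pvScoreA text (pvBlob a) <;>
      simp [h, ih, gt_iff_lt]

theorem pvMatches_eq (text : String) (schemes : List (List (String × String))) :
    pvMatches text schemes =
      (schemes.filter (fun s => decide (0 < pvScoreA text (pvBlob s)))).map
        (fun s => (pvScoreA text (pvBlob s), s)) := by
  simpa using pvMatches_eq_aux text schemes []

-- bucket concatenation of a pair list along a key list
def pvKeyBuckets (ks : List Int) (xs : List (Int × List (String × String))) :
    List (Int × List (String × String)) :=
  ks.flatMap (fun k => xs.filter (fun p => p.1 == k))

theorem pv_insertBy_append_skip {α : Type} (before : α → α → Bool) (x : α) :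
    ∀ (l rest : List α), (∀ y ∈ l, before x y = false) →
      PySem.List.insertBy before x (l ++ rest) = l ++ PySem.List.insertBy before x rest := by
  intro l
  induction l with
  | nil => intro rest _; simp
  | cons y l ih =>
    intro rest h
    have hy : before x y = false := h y (by simp)
    simp only [List.cons_append, PySem.List.insertBy, hy]
    simp [ih rest (fun z hz => h z (by simp [hz]))]

theorem pv_insertBy_front {α : Type} (before : α → α → Bool) (x : α) (l : List α)
    (h : ∀ y ∈ l, before x y = true) :
    PySem.List.insertBy before x l = x :: l := by
  cases l with
  | nil => rfl
  | cons y l => simp [PySem.List.insertBy, h y (by simp)]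

theorem pv_mem_keyBuckets (ks : List Int) (xs : List (Int × List (String × String)))
    (p : Int × List (String × String)) (hp : p ∈ pvKeyBuckets ks xs) : p.1 ∈ ks := by
  unfold pvKeyBuckets at hp
  simp only [List.mem_flatMap, List.mem_filter, beq_iff_eq] at hp
  obtain ⟨k, hk, _, hpk⟩ := hp
  exact hpk ▸ hk

theorem pv_keyBuckets_append_notmem (ks : List Int) (x : Int × List (String × String))
    (xs : List (Int × List (String × String))) (hx : x.1 ∉ ks) :
    pvKeyBuckets ks (xs ++ [x]) = pvKeyBuckets ks xs := by
  induction ks with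
  | nil => rfl
  | cons k ks ih =>
    have hxk : (x.1 == k) = false := by
      simp only [beq_eq_false_iff_ne]; intro h; exact hx (by simp [h])
    have hih := ih (fun h => hx (by simp [h]))
    have e1 : pvKeyBuckets (k :: ks) (xs ++ [x]) =
        (xs ++ [x]).filter (fun p => p.1 == k) ++ pvKeyBuckets ks (xs ++ [x]) := by
      simp [pvKeyBuckets]
    have e2 : pvKeyBuckets (k :: ks) xs =
        xs.filter (fun p => p.1 == k) ++ pvKeyBuckets ks xs := by
      simp [pvKeyBuckets]
    rw [e1, e2, hih, List.filter_append]
    simp [hxk]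

theorem pv_insertBy_keyBuckets :
    ∀ (ks : List Int), ks.Pairwise (fun a b => b < a) →
    ∀ (x : Int × List (String × String)) (xs : List (Int × List (String × String))),
      x.1 ∈ ks →
      PySem.List.insertBy (fun a b => decide (b.1 < a.1)) x (pvKeyBuckets ks xs) =
        pvKeyBuckets ks (xs ++ [x]) := by
  intro ks
  induction ks with
  | nil => intro _ x xs hx; simp at hx
  | cons k ks ih =>
    intro hp x xs hx
    have hlt : ∀ j ∈ ks, j < k := (List.pairwise_cons.1 hp).1
    have hp' := (List.pairwise_cons.1 hp).2
    have hKB : pvKeyBuckets (k :: ks) xs =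
        xs.filter (fun p => p.1 == k) ++ pvKeyBuckets ks xs := by
      simp [pvKeyBuckets]
    have hKB' : pvKeyBuckets (k :: ks) (xs ++ [x]) =
        (xs ++ [x]).filter (fun p => p.1 == k) ++ pvKeyBuckets ks (xs ++ [x]) := by
      simp [pvKeyBuckets]
    rcases List.mem_cons.1 hx with heq | hmem
    · have hskip : ∀ y ∈ xs.filter (fun p => p.1 == k),
          (fun (a b : Int × List (String × String)) => decide (b.1 < a.1)) x y = false := by
        intro y hy
        have hyk : y.1 = k := by
          have := (List.mem_filter.1 hy).2
          simpa [beq_iff_eq] using this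
        simp [hyk, heq]
      have hfront : ∀ y ∈ pvKeyBuckets ks xs,
          (fun (a b : Int × List (String × String)) => decide (b.1 < a.1)) x y = true := by
        intro y hy
        have h1 := pv_mem_keyBuckets ks xs y hy
        have h2 := hlt _ h1
        simp only [decide_eq_true_eq]
        omega
      have hnot : x.1 ∉ ks := by
        intro h; have := hlt _ h; omega
      rw [hKB, pv_insertBy_append_skip _ _ _ _ hskip, pv_insertBy_front _ _ _ hfront,
        hKB', pv_keyBuckets_append_notmem ks x xs hnot]
      simp [List.filter_append, heq]
    · have hxk : x.1 < k := hlt _ hmem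
      have hskip : ∀ y ∈ xs.filter (fun p => p.1 == k),
          (fun (a b : Int × List (String × String)) => decide (b.1 < a.1)) x y = false := by
        intro y hy
        have hyk : y.1 = k := by
          have := (List.mem_filter.1 hy).2
          simpa [beq_iff_eq] using this
        simp only [hyk, decide_eq_false_iff_not]
        omega
      have hxkne : (x.1 == k) = false := by
        simp only [beq_eq_false_iff_ne]; omega
      rw [hKB, pv_insertBy_append_skip _ _ _ _ hskip, ih hp' x xs hmem, hKB']
      simp [List.filter_append, hxkne]

theorem pv_sorted_keyBuckets (ks : List Int) (hks : ks.Pairwise (fun a b => b < a)) :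
    ∀ (xs : List (Int × List (String × String))), (∀ p ∈ xs, p.1 ∈ ks) →
      PySem.List.sorted xs (fun m => m.1) true = pvKeyBuckets ks xs := by
  intro xs
  induction xs using List.reverseRecOn with
  | nil => intro _; simp [pvKeyBuckets, PySem.List.sorted]
  | append_singleton ys x ih =>
    intro hmem
    rw [PySem.List.sorted_rev_eq_foldl_insertBy, List.foldl_append, List.foldl_cons,
      List.foldl_nil, ← PySem.List.sorted_rev_eq_foldl_insertBy,
      ih (fun p hp => hmem p (by simp [hp]))]
    exact pv_insertBy_keyBuckets ks hks x ys (hmem x (by simp))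

-- projecting the bucketed matches back to schemes
theorem pv_keyBuckets_map_snd (text : String) (schemes : List (List (String × String))) :
    ∀ (ks : List Int), (∀ k ∈ ks, (1 : Int) ≤ k) →
      (pvKeyBuckets ks
        ((schemes.filter (fun s => decide (0 < pvScoreA text (pvBlob s)))).map
          (fun s => (pvScoreA text (pvBlob s), s)))).map (fun m => m.2) =
      ks.flatMap (fun k => schemes.filter (fun s => pvScoreA text (pvBlob s) == k)) := by
  intro ks
  induction ks with
  | nil => intro _; simp [pvKeyBuckets]
  | cons k ks ih =>
    intro hk
    have hk1 : (1 : Int) ≤ k := hk k (by simp)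
    set M := (schemes.filter (fun s => decide (0 < pvScoreA text (pvBlob s)))).map
      (fun s => (pvScoreA text (pvBlob s), s)) with hM
    have hKB : pvKeyBuckets (k :: ks) M = M.filter (fun p => p.1 == k) ++ pvKeyBuckets ks M := by
      simp [pvKeyBuckets]
    rw [hKB, List.map_append, ih (fun j hj => hk j (by simp [hj])), List.flatMap_cons]
    congr 1
    rw [List.filter_map, List.map_map]
    have hcomp : ((fun (m : Int × List (String × String)) => m.2) ∘
        (fun s => (pvScoreA text (pvBlob s), s))) = id := rfl
    rw [hcomp, List.map_id, List.filter_filter]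
    apply List.filter_congr
    intro s _
    by_cases h : pvScoreA text (pvBlob s) = k
    · have h1 : (pvScoreA text (pvBlob s) == k) = true := by simp [h]
      have h2 : decide (0 < pvScoreA text (pvBlob s)) = true := by
        simp only [h, decide_eq_true_eq]; omega
      simp [h1, h2]
    · have : (pvScoreA text (pvBlob s) == k) = false := by
        simp only [beq_eq_false_iff_ne]; exact h
      simp [this]

-- the bucket-filling loop, bucket by bucket
theorem pv_buckets_getD_aux (active : List String)
    (hb : ∀ s, pvScoreB active (pvBlob s) ≤ 13) :
    ∀ (l : List (List (String × String))) (bk : List (List (List (String × String)))),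
      bk.length = 14 → ∀ (k : Int), 1 ≤ k → k ≤ 13 →
      PySem.List.pyGetD
        (l.foldl
          (fun bk s =>
            let score := pvScoreB active (pvBlob s)
            if score > 0 then
              PySem.List.pySetD bk score (PySem.List.pyGetD bk score [] ++ [s])
            else bk) bk) k [] =
      PySem.List.pyGetD bk k [] ++ l.filter (fun s => pvScoreB active (pvBlob s) == k) := by
  intro l
  induction l with
  | nil => intro bk _ k _ _; simp
  | cons s l ih =>
    intro bk hlen k hk1 hk13
    by_cases hpos : 0 < pvScoreB active (pvBlob s)
    · have hle := hb s
      set sc := pvScoreB active (pvBlob s) with hsc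
      have hscn : sc = ((sc.toNat : Nat) : Int) := by omega
      have hkn : k = ((k.toNat : Nat) : Int) := by omega
      have hlt : sc.toNat < bk.length := by omega
      have hget : PySem.List.pyGetD
          (PySem.List.pySetD bk sc (PySem.List.pyGetD bk sc [] ++ [s])) k [] =
          if k.toNat = sc.toNat then PySem.List.pyGetD bk sc [] ++ [s]
          else PySem.List.pyGetD bk k [] := by
        rw [hscn, hkn, PySem.List.pyGetD_pySetD_natCast _ _ _ _ _ (by omega)]
        by_cases h : k.toNat = sc.toNat <;> simp [h, ← hscn, ← hkn]
      have hlen' : (PySem.List.pySetD bk sc (PySem.List.pyGetD bk sc [] ++ [s])).length = 14 := by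
        rw [PySem.List.length_pySetD]; exact hlen
      simp only [List.foldl_cons, gt_iff_lt, ← hsc, hpos, if_true]
      rw [ih _ hlen' k hk1 hk13, hget, List.filter_cons]
      by_cases h : k.toNat = sc.toNat
      · have heqk : (pvScoreB active (pvBlob s) == k) = true := by
          rw [← hsc]; simp only [beq_iff_eq]; omega
        have hscemk : sc = k := by omega
        simp [h, heqk, hscemk, List.append_assoc]
      · have hne : (pvScoreB active (pvBlob s) == k) = false := by
          rw [← hsc]; simp only [beq_eq_false_iff_ne]; omega
        simp [h, hne]
    · have : (pvScoreB active (pvBlob s) == k) = false := by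
        simp only [beq_eq_false_iff_ne]; omega
      simp only [List.foldl_cons, gt_iff_lt, hpos, if_false, List.filter_cons, this,
        Bool.false_eq_true]
      exact ih bk hlen k hk1 hk13

theorem pvScoreB_active_le (text blob : String) : pvScoreB (pvActive text) blob ≤ 13 := by
  rw [pvScore_eq]; exact pvScoreA_le text blob

theorem pv_buckets_getD (text : String) (schemes : List (List (String × String)))
    (k : Int) (hk1 : 1 ≤ k) (hk13 : k ≤ 13) :
    PySem.List.pyGetD (pvBuckets (pvActive text) schemes) k [] =
      schemes.filter (fun s => pvScoreA text (pvBlob s) == k) := by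
  unfold pvBuckets
  rw [pv_buckets_getD_aux (pvActive text) (fun s => pvScoreB_active_le text (pvBlob s))
    schemes (List.replicate 14 []) (by simp) k hk1 hk13]
  have hbase : PySem.List.pyGetD (List.replicate 14 ([] : List (List (String × String)))) k [] = [] := by
    rw [PySem.List.pyGetD_eq_getElem _ _ (by omega) (by simp; omega)]
    simp only [List.getElem_replicate]
  rw [hbase, List.nil_append]
  apply List.filter_congr
  intro s _
  rw [pvScore_eq]

-- a fold appending pointwise-known blocks is a flatMap
theorem pv_foldl_append_flatMap {α : Type} (F G : Int → List α) :
    ∀ (ks : List Int), (∀ k ∈ ks, F k = G k) → ∀ (acc : List α),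
      ks.foldl (fun acc k => acc ++ F k) acc = acc ++ ks.flatMap G := by
  intro ks
  induction ks with
  | nil => intro _ acc; simp
  | cons k ks ih =>
    intro h acc
    rw [List.foldl_cons, ih (fun j hj => h j (by simp [hj])), h k (by simp),
      List.flatMap_cons, List.append_assoc]

-- every score in a match is in 13..1
theorem pv_mem_range13 (k : Int) (h1 : 1 ≤ k) (h13 : k ≤ 13) :
    k ∈ PySem.List.pyRange 13 0 (-1) := by
  have : PySem.List.pyRange 13 0 (-1) = [13,12,11,10,9,8,7,6,5,4,3,2,1] := by decide
  rw [this]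
  simp only [List.mem_cons, List.not_mem_nil, or_false]
  omega

theorem pv_top_eq (text : String) (schemes : List (List (String × String))) :
    (PySem.List.slice
        (PySem.List.sorted (pvMatches text schemes) (fun m => m.1) true)
        none (some 3)).map (fun m => m.2) =
    PySem.List.slice
      ((PySem.List.pyRange 13 0 (-1)).foldl
        (fun acc k => acc ++ PySem.List.pyGetD (pvBuckets (pvActive text) schemes) k []) [])
      none (some 3) := by
  have hrangeP : (PySem.List.pyRange 13 0 (-1)).Pairwise (fun a b => b < a) := by decide
  have hmem : ∀ p ∈ (schemes.filter (fun s => decide (0 < pvScoreA text (pvBlob s)))).map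
      (fun s => (pvScoreA text (pvBlob s), s)), p.1 ∈ PySem.List.pyRange 13 0 (-1) := by
    intro p hp
    simp only [List.mem_map, List.mem_filter, decide_eq_true_eq] at hp
    obtain ⟨s, ⟨_, hpos⟩, rfl⟩ := hp
    exact pv_mem_range13 _ (by omega) (pvScoreA_le text (pvBlob s))
  have hone : ∀ k ∈ PySem.List.pyRange 13 0 (-1), (1 : Int) ≤ k := by decide
  have hbounds : ∀ k ∈ PySem.List.pyRange 13 0 (-1), (1 : Int) ≤ k ∧ k ≤ 13 := by decide
  rw [pvMatches_eq, pv_sorted_keyBuckets _ hrangeP _ hmem,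
    PySem.List.slice_to _ (by norm_num), PySem.List.slice_to _ (by norm_num),
    List.map_take, pv_keyBuckets_map_snd text schemes _ hone,
    pv_foldl_append_flatMap
      (fun k => PySem.List.pyGetD (pvBuckets (pvActive text) schemes) k [])
      (fun k => schemes.filter (fun s => pvScoreA text (pvBlob s) == k))
      _ (fun k hk => pv_buckets_getD text schemes k (hbounds k hk).1 (hbounds k hk).2) [],
    List.nil_append]

-- ===== VERDICT (by name: the statement is the Claim_ definition above) =====
theorem fallback_recommendation_spec : Claim_equal_fallback_recommendation := by
  intro user_input schemes _
  unfold Spec_fallback_recommendation fallback_recommendation fallback_recommendation_alt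
  by_cases hs : schemes.isEmpty
  · simp [hs]
  · simp only [hs, Bool.false_eq_true, if_false]
    exact congrArg pvFormat (pv_top_eq (PySem.Str.lower user_input) schemes)
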